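-- pv_equiv track=rewrite | github.com/paavanaadi-consulting/agentic-ai-customer-support | src/a2a_protocol/a2a_query_agent.py | _detect_sentiment_sync
-- ===== SOURCE A (Python) =====
-- def _detect_sentiment_sync(query: str) -> str:
--     """Simple synchronous sentiment detection"""
--     positive_words = ['thank', 'great', 'excellent', 'good', 'happy', 'satisfied']
--     negative_words = ['terrible', 'awful', 'bad', 'angry', 'frustrated', 'disappointed']
--
--     query_lower = query.lower()
--     pos_count = sum(1 for word in positive_words if word in query_lower)
--     neg_count = sum(1 for word in negative_words if word in query_lower)
--
--     if neg_count > pos_count: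
--         return 'negative'
--     elif pos_count > neg_count:
--         return 'positive'
--     else:
--         return 'neutral'
-- ===== SOURCE B (Python) =====
-- def _detect_sentiment_sync(query: str) -> str:
--     """Position-driven scan: walk the query once and collect, at each position,
--     the set of keywords that start there; then sum the weights of the distinct
--     keywords found and return the sign."""
--     weights = {'thank': 1, 'great': 1, 'excellent': 1, 'good': 1,
--                'happy': 1, 'satisfied': 1,
--                'terrible': -1, 'awful': -1, 'bad': -1, 'angry': -1,
--                'frustrated': -1, 'disappointed': -1}
--     q = query.lower()
--     found = set()
--     for i in range(len(q)):
--         for w in weights: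
--             if q.startswith(w, i):
--                 found.add(w)
--     score = sum(weights[w] for w in found)
--     if score > 0:
--         return 'positive'
--     if score < 0:
--         return 'negative'
--     return 'neutral'
-- ===== Notes on version B (the rewrite author's own statement) =====
-- stated objective: alternative
-- what changed: Instead of testing each keyword list for substring membership and comparing two counts, B walks the query position by position, collects the set of keywords that start at each position, and returns the sign of the summed weights of the distinct keywords found.
import Mathlib
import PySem

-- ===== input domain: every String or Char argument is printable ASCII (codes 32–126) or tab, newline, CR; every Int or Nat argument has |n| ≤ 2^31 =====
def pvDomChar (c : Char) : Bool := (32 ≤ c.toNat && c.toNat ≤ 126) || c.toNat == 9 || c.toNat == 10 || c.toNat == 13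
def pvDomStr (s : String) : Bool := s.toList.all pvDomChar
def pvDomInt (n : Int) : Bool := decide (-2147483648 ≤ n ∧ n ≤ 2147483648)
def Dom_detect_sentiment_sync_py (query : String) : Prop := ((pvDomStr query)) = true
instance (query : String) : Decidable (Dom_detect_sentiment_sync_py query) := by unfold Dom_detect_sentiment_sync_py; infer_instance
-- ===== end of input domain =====

-- B replaces A's keyword-major substring tests by a position-driven scan of the query:
-- it walks the query once, collects the set of keywords starting at each position, and
-- sums their weights (objective: alternative — a different traversal and data structure).


-- ===== PORT A =====
def detect_sentiment_sync_py (query : String) : String :=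
  let positive_words : List String := ["thank", "great", "excellent", "good", "happy", "satisfied"]
  let negative_words : List String := ["terrible", "awful", "bad", "angry", "frustrated", "disappointed"]
  let query_lower := PySem.Str.lower query
  let pos_count : Nat := positive_words.foldl (fun acc w => if PySem.Str.isIn w query_lower then acc + 1 else acc) 0
  let neg_count : Nat := negative_words.foldl (fun acc w => if PySem.Str.isIn w query_lower then acc + 1 else acc) 0
  if neg_count > pos_count then "negative"
  else if pos_count > neg_count then "positive"
  else "neutral"

-- ===== PORT B =====
-- the 'weights' dict of Source B (B-side helper)
def pvWeights : PySem.Dict String Int :=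
  PySem.Dict.ofList
    [("thank", 1), ("great", 1), ("excellent", 1), ("good", 1), ("happy", 1), ("satisfied", 1),
     ("terrible", -1), ("awful", -1), ("bad", -1), ("angry", -1), ("frustrated", -1), ("disappointed", -1)]

def detect_sentiment_sync_py_alt (query : String) : String :=
  let q := PySem.Str.lower query
  -- for i in range(len(q)): for w in weights: if q.startswith(w, i): found.add(w)
  -- q.startswith(w, i) ported as startswith on q[i:]; exact since range yields 0 ≤ i < len(q)
  let found : PySem.Set String :=
    (PySem.List.pyRange 0 (PySem.Str.len q) 1).foldl
      (fun f i =>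
        (PySem.Dict.keys pvWeights).foldl
          (fun f w => if PySem.Chars.startswith (q.toList.drop i.toNat) w.toList then PySem.Set.add f w else f)
          f)
      PySem.Set.empty
  -- score = sum(weights[w] for w in found): order-independent consumption of the set
  let score : Int := found.foldl (fun s w => s + PySem.Dict.getD pvWeights w 0) 0
  if score > 0 then "positive"
  else if score < 0 then "negative"
  else "neutral"

-- ===== PRECONDITION & SPEC =====
def Spec_detect_sentiment_sync_py (query : String) (out : String) : Prop := out = detect_sentiment_sync_py_alt query
instance (query : String) (out : String) : Decidable (Spec_detect_sentiment_sync_py query out) := by unfold Spec_detect_sentiment_sync_py; infer_instance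

-- ===== CLAIM (what is proved, stated in full; the proofs are below) =====
def Claim_equal_detect_sentiment_sync_py : Prop := ∀ (query : String), Dom_detect_sentiment_sync_py query → Spec_detect_sentiment_sync_py query (detect_sentiment_sync_py query)

-- ===== LEMMAS AND PROOFS =====

-- membership after the inner loop over the keyword list at one position
theorem pv_mem_inner (ws : List String) (f : List String) (p : String → Bool) (w : String) :
    w ∈ ws.foldl (fun f u => if p u then PySem.Set.add f u else f) f ↔
      w ∈ f ∨ (w ∈ ws ∧ p w = true) := by
  induction ws generalizing f with
  | nil => simp
  | cons a l ih =>
    simp only [List.foldl_cons, ih]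
    by_cases ha : p a = true
    · simp only [ha, if_pos, PySem.Set.mem_add, List.mem_cons]
      constructor
      · rintro (⟨h | rfl⟩ | ⟨hl, hp⟩) <;> tauto
      · rintro (h | ⟨(rfl | hl), hp⟩) <;> tauto
    · simp only [ha, List.mem_cons]
      constructor
      · rintro (h | ⟨hl, hp⟩) <;> tauto
      · rintro (h | ⟨(rfl | hl), hp⟩) <;> tauto

theorem pv_nodup_inner (ws : List String) (f : List String) (p : String → Bool)
    (hf : f.Nodup) :
    (ws.foldl (fun f u => if p u then PySem.Set.add f u else f) f).Nodup := by
  induction ws generalizing f with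
  | nil => exact hf
  | cons a l ih =>
    simp only [List.foldl_cons]
    apply ih
    by_cases ha : p a = true
    · simp only [ha, if_pos]; exact PySem.Set.nodup_add _ _ hf
    · simpa [ha] using hf

-- membership after the outer loop over the positions
theorem pv_mem_scan (I : List Int) (ws : List String) (f : List String)
    (p : Int → String → Bool) (w : String) :
    w ∈ I.foldl (fun f i => ws.foldl (fun f u => if p i u then PySem.Set.add f u else f) f) f ↔
      w ∈ f ∨ (w ∈ ws ∧ ∃ i ∈ I, p i w = true) := by
  induction I generalizing f with
  | nil => simp
  | cons a l ih =>
    simp only [List.foldl_cons, ih, pv_mem_inner, List.mem_cons]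
    constructor
    · rintro ((h | ⟨hw, hp⟩) | ⟨hw, i, hi, hp⟩)
      · tauto
      · exact Or.inr ⟨hw, a, Or.inl rfl, hp⟩
      · exact Or.inr ⟨hw, i, Or.inr hi, hp⟩
    · rintro (h | ⟨hw, i, (rfl | hi), hp⟩)
      · tauto
      · exact Or.inl (Or.inr ⟨hw, hp⟩)
      · exact Or.inr ⟨hw, i, hi, hp⟩

theorem pv_nodup_scan (I : List Int) (ws : List String) (f : List String)
    (p : Int → String → Bool) (hf : f.Nodup) :
    (I.foldl (fun f i => ws.foldl (fun f u => if p i u then PySem.Set.add f u else f) f) f).Nodup := by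
  induction I generalizing f with
  | nil => exact hf
  | cons a l ih => exact ih _ (pv_nodup_inner _ _ _ hf)

-- a keyword is collected by the scan iff it occurs as a substring (keyword nonempty)
theorem pv_pos_iff (L : List Char) (u : List Char) (hu : u ≠ []) :
    (∃ i ∈ PySem.List.pyRange 0 (L.length : Int) 1,
        PySem.Chars.startswith (L.drop i.toNat) u = true) ↔
      PySem.Chars.isIn u L = true := by
  rw [← PySem.Chars.exists_prefix_drop_iff_isIn]
  constructor
  · rintro ⟨i, _, hp⟩
    exact ⟨i.toNat, (PySem.Chars.startswith_iff _ _).mp hp⟩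
  · rintro ⟨j, hj⟩
    by_cases hjl : j < L.length
    · refine ⟨(j : Int), ?_, ?_⟩
      · rw [PySem.List.mem_pyRange_one]
        constructor <;> [positivity; exact_mod_cast hjl]
      · rw [PySem.Chars.startswith_iff]
        simpa using hj
    · exfalso
      have : L.drop j = [] := List.drop_eq_nil_of_le (by omega)
      rw [this] at hj
      exact hu (List.prefix_nil.mp hj)

-- folding '+ weight' over a list is adding the sum of the mapped weights
theorem pv_foldl_add_sum (wt : String → Int) (l : List String) (c : Int) :
    l.foldl (fun s w => s + wt w) c = c + (l.map wt).sum := by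
  induction l generalizing c with
  | nil => simp
  | cons a t ih => simp [ih, add_assoc]

-- B's result in keyword-major form: sum the weights of the keywords that occur
theorem pv_alt_eq (query : String) :
    detect_sentiment_sync_py_alt query =
      (let ql := PySem.Str.lower query
       let score : Int :=
         ((["thank", "great", "excellent", "good", "happy", "satisfied",
            "terrible", "awful", "bad", "angry", "frustrated", "disappointed"].filter
            (fun w => PySem.Str.isIn w ql)).map (fun w => PySem.Dict.getD pvWeights w 0)).sum
       if score > 0 then "positive" else if score < 0 then "negative" else "neutral") := by
  unfold detect_sentiment_sync_py_alt
  simp only []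
  set ql := PySem.Str.lower query with hql
  set L := ql.toList with hL
  set p : Int → String → Bool := fun i w => PySem.Chars.startswith (L.drop i.toNat) w.toList with hp
  set ws : List String := PySem.Dict.keys pvWeights with hws
  have hws0 : ws = ["thank", "great", "excellent", "good", "happy", "satisfied",
      "terrible", "awful", "bad", "angry", "frustrated", "disappointed"] := by
    rw [hws]; decide
  set found : List String :=
    (PySem.List.pyRange 0 (PySem.Str.len ql) 1).foldl
      (fun f i => ws.foldl (fun f w => if p i w then PySem.Set.add f w else f) f)
      PySem.Set.empty with hfound
  have hlen : PySem.Str.len ql = (L.length : Int) := by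
    simp [PySem.Str.len, hL]
  have hmem : ∀ w : String, w ∈ found ↔
      w ∈ ws ∧ ∃ i ∈ PySem.List.pyRange 0 (L.length : Int) 1, p i w = true := by
    intro w
    rw [hfound, hlen, pv_mem_scan]
    simp [PySem.Set.empty]
  have hmem' : ∀ w ∈ ws, (w ∈ found ↔ PySem.Str.isIn w ql = true) := by
    intro w hw
    rw [hmem w]
    have hu : w.toList ≠ [] := by
      rw [hws0] at hw
      fin_cases hw <;> decide
    rw [PySem.Str.isIn_eq, ← hL]
    constructor
    · rintro ⟨_, h⟩; exact (pv_pos_iff L w.toList hu).mp h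
    · intro h; exact ⟨hw, (pv_pos_iff L w.toList hu).mpr h⟩
  have hnodup : found.Nodup := by
    rw [hfound]; exact pv_nodup_scan _ _ _ _ (by simp [PySem.Set.empty])
  have hsub : ∀ w ∈ found, w ∈ ws := fun w hw => ((hmem w).mp hw).1
  -- found is a permutation of the kept keywords in table order
  have hperm : found.Perm (ws.filter (fun w => decide (w ∈ found))) := by
    rw [List.perm_ext_iff_of_nodup hnodup (List.Nodup.filter _ (by rw [hws]; decide))]
    intro a
    simp only [List.mem_filter, decide_eq_true_eq]
    exact ⟨fun h => ⟨hsub a h, h⟩, fun h => h.2⟩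
  have hsum : found.foldl (fun s w => s + PySem.Dict.getD pvWeights w 0) 0 =
      ((ws.filter (fun w => decide (w ∈ found))).map (fun w => PySem.Dict.getD pvWeights w 0)).sum := by
    rw [pv_foldl_add_sum, zero_add]
    exact (hperm.map _).sum_eq
  rw [hsum]
  -- the membership test agrees with the substring test on every table keyword
  have hfil : ws.filter (fun w => decide (w ∈ found)) =
      ws.filter (fun w => PySem.Str.isIn w ql) := by
    apply List.filter_congr
    intro w hw
    have h := hmem' w hw
    cases hin : PySem.Str.isIn w ql
    · have hnf : w ∉ found := fun hf => by rw [h, hin] at hf; cases hf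
      simp [hnf]
    · have hfd : w ∈ found := h.mpr hin
      simp [hfd]
  rw [hfil, hws0]

-- if-accumulation rewritten to Bool.toNat so omega can finish
theorem pvAddIfNat (b : Bool) (acc : Nat) : (if b = true then acc + 1 else acc) = acc + b.toNat := by
  cases b <;> simp

theorem pvItePos (b : Bool) : (if b = true then (1 : Int) else 0) = (b.toNat : Int) := by
  cases b <;> simp

theorem pvIteNeg (b : Bool) : (if b = true then (-1 : Int) else 0) = -(b.toNat : Int) := by
  cases b <;> simp

-- a filtered-and-mapped sum is the sum of guarded terms
theorem pv_sum_filter (p : String → Bool) (f : String → Int) (l : List String) :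
    ((l.filter p).map f).sum = (l.map (fun w => if p w = true then f w else 0)).sum := by
  induction l with
  | nil => simp
  | cons a t ih =>
    by_cases ha : p a = true <;> simp [ha, ih]

-- ===== VERDICT (by name: the statement is the Claim_ definition above) =====
theorem detect_sentiment_sync_py_spec : Claim_equal_detect_sentiment_sync_py := by
  intro query _
  unfold Spec_detect_sentiment_sync_py
  rw [pv_alt_eq]
  unfold detect_sentiment_sync_py
  simp only [pv_sum_filter, List.map_cons, List.map_nil, List.sum_cons, List.sum_nil, List.foldl]
  have g1 : PySem.Dict.getD pvWeights "thank" 0 = 1 := by decide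
  have g2 : PySem.Dict.getD pvWeights "great" 0 = 1 := by decide
  have g3 : PySem.Dict.getD pvWeights "excellent" 0 = 1 := by decide
  have g4 : PySem.Dict.getD pvWeights "good" 0 = 1 := by decide
  have g5 : PySem.Dict.getD pvWeights "happy" 0 = 1 := by decide
  have g6 : PySem.Dict.getD pvWeights "satisfied" 0 = 1 := by decide
  have g7 : PySem.Dict.getD pvWeights "terrible" 0 = -1 := by decide
  have g8 : PySem.Dict.getD pvWeights "awful" 0 = -1 := by decide
  have g9 : PySem.Dict.getD pvWeights "bad" 0 = -1 := by decide
  have g10 : PySem.Dict.getD pvWeights "angry" 0 = -1 := by decide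
  have g11 : PySem.Dict.getD pvWeights "frustrated" 0 = -1 := by decide
  have g12 : PySem.Dict.getD pvWeights "disappointed" 0 = -1 := by decide
  simp only [g1, g2, g3, g4, g5, g6, g7, g8, g9, g10, g11, g12, pvAddIfNat, pvItePos, pvIteNeg]
  generalize (PySem.Str.isIn "thank" (PySem.Str.lower query)).toNat = x1
  generalize (PySem.Str.isIn "great" (PySem.Str.lower query)).toNat = x2
  generalize (PySem.Str.isIn "excellent" (PySem.Str.lower query)).toNat = x3
  generalize (PySem.Str.isIn "good" (PySem.Str.lower query)).toNat = x4
  generalize (PySem.Str.isIn "happy" (PySem.Str.lower query)).toNat = x5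
  generalize (PySem.Str.isIn "satisfied" (PySem.Str.lower query)).toNat = x6
  generalize (PySem.Str.isIn "terrible" (PySem.Str.lower query)).toNat = x7
  generalize (PySem.Str.isIn "awful" (PySem.Str.lower query)).toNat = x8
  generalize (PySem.Str.isIn "bad" (PySem.Str.lower query)).toNat = x9
  generalize (PySem.Str.isIn "angry" (PySem.Str.lower query)).toNat = x10
  generalize (PySem.Str.isIn "frustrated" (PySem.Str.lower query)).toNat = x11
  generalize (PySem.Str.isIn "disappointed" (PySem.Str.lower query)).toNat = x12
  split_ifs <;> first | rfl | omega
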